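-- pv_equiv track=rewrite | github.com/giovanniCL/advent-of-code_2023 | day_14_parabolic_reflector_dish/solution.py | rotate_anticlockwise
-- ===== SOURCE A (Python) =====
-- def rotate_anticlockwise(pattern):
--     rotated = []
--     row_len = len(pattern[0])
--     for j in range(row_len, 0, -1):
--         rotated_row = []
--         for row in pattern:
--             rotated_row.append(row[j - 1])
--         rotated.append(rotated_row)
--     return rotated
-- ===== SOURCE B (Python) =====
-- def rotate_anticlockwise(pattern):
--     n = len(pattern[0])
--     cols = [[] for _ in range(n)]
--     for row in pattern:
--         for i in range(n):
--             cols[n - 1 - i].append(row[i])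
--     return cols
-- ===== Notes on version B (the rewrite author's own statement) =====
-- stated objective: alternative
-- what changed: B pre-allocates the n output rows as empty buckets and makes a single pass over the input rows, distributing each element row[i] into bucket n-1-i, instead of A's outer loop over columns that re-scans the whole grid once per column.
import Mathlib
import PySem

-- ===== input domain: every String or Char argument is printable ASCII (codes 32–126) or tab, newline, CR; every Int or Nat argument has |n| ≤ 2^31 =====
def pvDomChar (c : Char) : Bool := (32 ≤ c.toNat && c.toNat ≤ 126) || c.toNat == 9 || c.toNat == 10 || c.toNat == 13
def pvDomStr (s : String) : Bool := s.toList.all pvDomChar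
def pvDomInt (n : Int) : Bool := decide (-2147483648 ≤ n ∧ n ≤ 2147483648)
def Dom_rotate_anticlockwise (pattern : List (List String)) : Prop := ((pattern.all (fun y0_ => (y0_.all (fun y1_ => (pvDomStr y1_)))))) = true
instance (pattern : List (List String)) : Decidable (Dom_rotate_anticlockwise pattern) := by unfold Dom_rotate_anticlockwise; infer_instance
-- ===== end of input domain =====

-- B pre-allocates the n output rows as empty buckets and fills them in one pass over the input
-- rows (distributing row[i] into bucket n-1-i), instead of A's per-column scans of the whole grid;
-- return-value equivalence on nonempty grids whose rows are at least as long as the first row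
-- (exactly where A returns without an IndexError).


-- ===== PORT A =====
def rotate_anticlockwise (pattern : List (List String)) : List (List String) :=
  let rowLen : Int := ((PySem.List.pyGetD pattern 0 []).length : Int)
  (PySem.List.pyRange rowLen 0 (-1)).foldl
    (fun rotated j =>
      rotated ++ [pattern.foldl (fun rotatedRow row => rotatedRow ++ [PySem.List.pyGetD row (j - 1) ""]) []])
    []

-- ===== PORT B =====
-- one pass over the rows; each element row[i] is appended to output bucket n-1-i
def pyB_fill (n : Nat) (pattern : List (List String)) : List (List String) :=
  pattern.foldl
    (fun cols row =>
      (List.range n).foldl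
        (fun cols i => cols.modify (n - 1 - i) (fun col => col ++ [row.getD i ""])) cols)
    (List.replicate n [])
def rotate_anticlockwise_alt (pattern : List (List String)) : List (List String) :=
  let n : Nat := (PySem.List.pyGetD pattern 0 []).length
  pyB_fill n pattern

-- ===== PRECONDITION & SPEC =====
-- Pre_ admits exactly the inputs on which Python A returns: a nonempty grid whose every row is at
-- least as long as the first row (otherwise A raises IndexError on pattern[0] or row[j-1]).
def Pre_rotate_anticlockwise (pattern : List (List String)) : Prop :=
  pattern ≠ [] ∧ ∀ row ∈ pattern, (pattern.headD []).length ≤ row.length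
instance (pattern : List (List String)) : Decidable (Pre_rotate_anticlockwise pattern) := by
  unfold Pre_rotate_anticlockwise; infer_instance
def pvWitness_rotate_anticlockwise : List (List String) := [["a", "b"], ["c", "d"]]

def Spec_rotate_anticlockwise (pattern : List (List String)) (out : List (List String)) : Prop := out = rotate_anticlockwise_alt pattern
instance (pattern : List (List String)) (out : List (List String)) : Decidable (Spec_rotate_anticlockwise pattern out) := by unfold Spec_rotate_anticlockwise; infer_instance

-- ===== CLAIM (what is proved, stated in full; the proofs are below) =====
def Claim_equal_rotate_anticlockwise : Prop := ∀ (pattern : List (List String)), Dom_rotate_anticlockwise pattern → Pre_rotate_anticlockwise pattern → Spec_rotate_anticlockwise pattern (rotate_anticlockwise pattern)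

-- ===== LEMMAS AND PROOFS =====

-- the columns of the grid, read left to right
def columnsOf (pattern : List (List String)) (n : Nat) : List (List String) :=
  (List.range n).map (fun i => pattern.map (fun row => row.getD i ""))

-- B's buckets after processing the rows P: bucket k holds column n-1-k of P
def bucketsOf (n : Nat) (P : List (List String)) : List (List String) :=
  (List.range n).map (fun k => P.map (fun row => row.getD (n - 1 - k) ""))

lemma portA_eq_columns_reverse (pattern : List (List String))
    (hpre : Pre_rotate_anticlockwise pattern) :
    rotate_anticlockwise pattern = (columnsOf pattern (pattern.headD []).length).reverse := by
  obtain ⟨hne, hall⟩ := hpre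
  set n : Nat := (pattern.headD []).length with hn
  have hget0 : PySem.List.pyGetD pattern 0 ([] : List String) = pattern.headD [] := by
    cases pattern with
    | nil => exact absurd rfl hne
    | cons r rs => simp [PySem.List.pyGetD_zero_cons]
  unfold rotate_anticlockwise
  simp only [hget0, ← hn]
  rw [PySem.List.foldl_append_singleton_eq_map]
  simp only [List.nil_append]
  have hmap : ∀ j : Int,
      pattern.foldl (fun rotatedRow row => rotatedRow ++ [PySem.List.pyGetD row (j - 1) ""]) [] =
      pattern.map (fun row => PySem.List.pyGetD row (j - 1) "") := by
    intro j
    rw [PySem.List.foldl_append_singleton_eq_map]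
    simp
  simp only [hmap]
  rw [PySem.List.pyRange_neg_one]
  apply List.ext_getElem
  · simp [columnsOf]
  · intro i h1 h2
    simp only [List.length_map, List.length_range] at h1
    have hi : i < n := by omega
    simp only [List.getElem_map, List.getElem_range, List.getElem_reverse]
    simp only [columnsOf, List.length_map, List.length_range, List.getElem_map, List.getElem_range]
    apply List.map_congr_left
    intro r hr
    have hrlen : n ≤ r.length := hall r hr
    have hcast : (n : Int) - (i : Int) - 1 = ((n - 1 - i : Nat) : Int) := by omega
    rw [hcast, PySem.List.pyGetD_natCast]

-- one row step of B: folding over range m appends f (n-1-k) to every bucket k ≥ n-m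
lemma inner_fold_get (n : Nat) (f : Nat → String) :
    ∀ (m : Nat), m ≤ n → ∀ (cols : List (List String)), cols.length = n →
      ∀ (k : Nat) (hk : k < ((List.range m).foldl
          (fun cols i => cols.modify (n - 1 - i) (fun col => col ++ [f i])) cols).length)
        (hk' : k < cols.length),
      ((List.range m).foldl
          (fun cols i => cols.modify (n - 1 - i) (fun col => col ++ [f i])) cols)[k]
        = if n - m ≤ k then cols[k] ++ [f (n - 1 - k)] else cols[k] := by
  intro m
  induction m with
  | zero =>
    intro _ cols hlen k hk hk'
    simp only [List.range_zero, List.foldl_nil]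
    rw [if_neg]; omega
  | succ m ih =>
    intro hm cols hlen k hk hk'
    simp only [List.range_succ, List.foldl_append, List.foldl_cons, List.foldl_nil] at hk ⊢
    have hlenprev : ((List.range m).foldl
        (fun cols i => cols.modify (n - 1 - i) (fun col => col ++ [f i])) cols).length = n := by
      have : ∀ (l : List Nat) (c : List (List String)),
          (l.foldl (fun cols i => cols.modify (n - 1 - i) (fun col => col ++ [f i])) c).length
            = c.length := by
        intro l
        induction l with
        | nil => intro c; rfl
        | cons a l ihl => intro c; simp [ihl, List.length_modify]
      rw [this, hlen]
    have hkn : k < n := by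
      simpa [List.length_modify, hlenprev] using hk
    have hkprev : k < ((List.range m).foldl
        (fun cols i => cols.modify (n - 1 - i) (fun col => col ++ [f i])) cols).length := by
      omega
    rw [List.getElem_modify]
    rw [ih (by omega) cols hlen k hkprev hk']
    by_cases hcase : n - 1 - m = k
    · have hkm : k = n - 1 - m := hcase.symm
      rw [if_pos hcase]
      have hnot : ¬ n - m ≤ k := by omega
      rw [if_neg hnot, if_pos (by omega)]
      have : n - 1 - k = m := by omega
      rw [this]
    · rw [if_neg hcase]
      have hiff : (n - (m + 1) ≤ k) ↔ (n - m ≤ k) := by omega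
      simp only [hiff]

lemma inner_fold_eq (n : Nat) (row : List String) (P : List (List String)) :
    (List.range n).foldl
        (fun cols i => cols.modify (n - 1 - i) (fun col => col ++ [row.getD i ""]))
        (bucketsOf n P)
      = bucketsOf n (P ++ [row]) := by
  have hfoldlen : ∀ (l : List Nat) (c : List (List String)),
      (l.foldl (fun cols i => cols.modify (n - 1 - i) (fun col => col ++ [row.getD i ""])) c).length
        = c.length := by
    intro l
    induction l with
    | nil => intro c; rfl
    | cons a l ihl => intro c; rw [List.foldl_cons, ihl, List.length_modify]
  have hblen : (bucketsOf n P).length = n := by simp [bucketsOf]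
  apply List.ext_getElem
  · rw [hfoldlen]; simp [bucketsOf]
  · intro k h1 h2
    have hkn : k < n := by rw [hfoldlen, hblen] at h1; exact h1
    rw [inner_fold_get n (fun i => row.getD i "") n (le_refl n) (bucketsOf n P) hblen k h1
      (by omega)]
    rw [if_pos (by omega)]
    simp [bucketsOf]

lemma outer_fold_eq (n : Nat) :
    ∀ (rows P : List (List String)),
      rows.foldl
          (fun cols row =>
            (List.range n).foldl
              (fun cols i => cols.modify (n - 1 - i) (fun col => col ++ [row.getD i ""])) cols)
          (bucketsOf n P)
        = bucketsOf n (P ++ rows) := by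
  intro rows
  induction rows with
  | nil => intro P; simp
  | cons r rs ih =>
    intro P
    rw [List.foldl_cons, inner_fold_eq n r P, ih (P ++ [r])]
    simp

lemma portB_eq_buckets (pattern : List (List String)) :
    rotate_anticlockwise_alt pattern
      = bucketsOf (PySem.List.pyGetD pattern 0 []).length pattern := by
  show pyB_fill (PySem.List.pyGetD pattern 0 []).length pattern
      = bucketsOf (PySem.List.pyGetD pattern 0 []).length pattern
  unfold pyB_fill
  have hinit : List.replicate (PySem.List.pyGetD pattern 0 []).length ([] : List String)
      = bucketsOf (PySem.List.pyGetD pattern 0 []).length [] := by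
    simp [bucketsOf, List.map_const']
  rw [hinit, outer_fold_eq]
  simp

lemma buckets_eq_columns_reverse (pattern : List (List String)) (n : Nat) :
    bucketsOf n pattern = (columnsOf pattern n).reverse := by
  apply List.ext_getElem
  · simp [bucketsOf, columnsOf]
  · intro i h1 h2
    have hin : i < n := by simpa [bucketsOf] using h1
    simp [bucketsOf, columnsOf, List.getElem_reverse]

-- ===== VERDICT (by name: the statement is the Claim_ definition above) =====
theorem rotate_anticlockwise_spec : Claim_equal_rotate_anticlockwise := by
  intro pattern _ hpre
  unfold Spec_rotate_anticlockwise
  rw [portA_eq_columns_reverse pattern hpre, portB_eq_buckets, buckets_eq_columns_reverse]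
  obtain ⟨hne, _⟩ := hpre
  cases pattern with
  | nil => exact absurd rfl hne
  | cons r rs => simp [PySem.List.pyGetD_zero_cons]
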